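-- pv_equiv track=rewrite | github.com/jinyh/agent-memory-survey | src/references/indexing.py | _classify_paper
-- ===== SOURCE A (Python) =====
-- def _classify_paper(title: str) -> tuple[str, list[str], list[str], list[str]]:
--     lower = title.lower()
--     lifecycle = ["retrieval"]
--     functions = ["semantic"]
--     paper_type = "system"
--     tags = ["agent-memory"]
--
--     if any(k in lower for k in ("memoryagentbench", "memoryarena", "ama-bench", "locomo", "longmemeval", "very long-term conversational", "long-term interactive memory")):
--         lifecycle = ["evaluation"]
--         functions = ["episodic", "working"]
--         paper_type = "benchmark"
--         tags.extend(["benchmark", "agent-eval"])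
--     elif "recursive" in lower:
--         lifecycle = ["formation", "retrieval"]
--         functions = ["working"]
--         paper_type = "mechanism"
--         tags.extend(["recursive", "long-context"])
--     elif "sparse attention" in lower or "msa" in lower:
--         lifecycle = ["retrieval", "evolution"]
--         functions = ["working", "semantic"]
--         paper_type = "mechanism"
--         tags.extend(["latent-memory", "attention"])
--     elif "agentorchestra" in lower or "tea" in lower:
--         lifecycle = ["evolution", "retrieval"]
--         functions = ["procedural", "episodic"]
--         paper_type = "framework"
--         tags.extend(["multi-agent", "protocol"])
--     elif "memskill" in lower:
--         lifecycle = ["formation", "evolution"]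
--         functions = ["episodic", "procedural"]
--         paper_type = "method"
--         tags.extend(["memory-policy", "skill"])
--     elif "memoria" in lower:
--         lifecycle = ["formation", "evolution", "retrieval"]
--         functions = ["episodic", "semantic"]
--         paper_type = "framework"
--         tags.extend(["personalization", "memory-service"])
--     elif "bmam" in lower:
--         lifecycle = ["evolution", "retrieval"]
--         functions = ["episodic", "semantic", "procedural"]
--         paper_type = "framework"
--         tags.extend(["brain-inspired", "multi-agent"])
--     elif "memagent" in lower:
--         lifecycle = ["formation", "evolution", "retrieval"]
--         functions = ["working", "episodic"]
--         paper_type = "system"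
--         tags.extend(["rl", "long-context"])
--
--     return paper_type, lifecycle, functions, tags
-- ===== SOURCE B (Python) =====
-- # Flat keyword->rule-index map; classify by taking the MINIMUM matching rule
-- # index over a single full pass (no early-exit cascade), then index a table.
-- _KEYWORD_INDEX = {
--     "memoryagentbench": 0, "memoryarena": 0, "ama-bench": 0, "locomo": 0,
--     "longmemeval": 0, "very long-term conversational": 0,
--     "long-term interactive memory": 0,
--     "recursive": 1,
--     "sparse attention": 2, "msa": 2,
--     "agentorchestra": 3, "tea": 3,
--     "memskill": 4,
--     "memoria": 5,
--     "bmam": 6,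
--     "memagent": 7,
-- }
--
-- _META = [
--     ("benchmark", ["evaluation"], ["episodic", "working"], ["benchmark", "agent-eval"]),
--     ("mechanism", ["formation", "retrieval"], ["working"], ["recursive", "long-context"]),
--     ("mechanism", ["retrieval", "evolution"], ["working", "semantic"], ["latent-memory", "attention"]),
--     ("framework", ["evolution", "retrieval"], ["procedural", "episodic"], ["multi-agent", "protocol"]),
--     ("method", ["formation", "evolution"], ["episodic", "procedural"], ["memory-policy", "skill"]),
--     ("framework", ["formation", "evolution", "retrieval"], ["episodic", "semantic"], ["personalization", "memory-service"]),
--     ("framework", ["evolution", "retrieval"], ["episodic", "semantic", "procedural"], ["brain-inspired", "multi-agent"]),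
--     ("system", ["formation", "evolution", "retrieval"], ["working", "episodic"], ["rl", "long-context"]),
--     ("system", ["retrieval"], ["semantic"], []),  # default
-- ]
--
-- def _classify_paper(title: str) -> tuple[str, list[str], list[str], list[str]]:
--     lower = title.lower()
--     best = len(_META) - 1  # default slot
--     for kw, idx in _KEYWORD_INDEX.items():
--         if idx < best and kw in lower:
--             best = idx
--     paper_type, lifecycle, functions, extra = _META[best]
--     return paper_type, lifecycle, functions, ["agent-memory"] + extra
-- ===== Notes on version B (the rewrite author's own statement) =====
-- stated objective: alternative
-- what changed: Replaces the early-exit if/elif cascade with a single full pass over a flat keyword->rule-index map that computes the minimum matching rule index (accumulator, no early exit), then indexes a metadata table; correct because the cascade returns exactly the lowest-numbered rule with any matching keyword.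
import Mathlib
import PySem

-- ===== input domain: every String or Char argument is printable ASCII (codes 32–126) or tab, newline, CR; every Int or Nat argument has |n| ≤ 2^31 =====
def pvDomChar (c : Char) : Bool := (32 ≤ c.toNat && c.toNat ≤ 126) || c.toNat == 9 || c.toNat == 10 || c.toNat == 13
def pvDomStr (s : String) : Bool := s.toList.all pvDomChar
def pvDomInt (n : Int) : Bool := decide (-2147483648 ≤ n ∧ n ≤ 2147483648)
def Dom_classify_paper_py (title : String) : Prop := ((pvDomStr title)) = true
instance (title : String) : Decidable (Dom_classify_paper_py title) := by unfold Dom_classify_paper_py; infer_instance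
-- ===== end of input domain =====

-- B replaces A's early-exit if/elif cascade by one full pass over a flat keyword→rule-index
-- map computing the MINIMUM matching rule index, then indexes a metadata table
-- (objective: alternative; same cost, no speed claim).

-- ===== PORT A =====
def classify_paper_py (title : String) : String × List String × List String × List String :=
  let lower := PySem.Str.lower title
  let lifecycle := ["retrieval"]
  let functions := ["semantic"]
  let paper_type := "system"
  let tags := ["agent-memory"]
  if ["memoryagentbench", "memoryarena", "ama-bench", "locomo", "longmemeval",
      "very long-term conversational", "long-term interactive memory"].any
        (fun k => PySem.Str.isIn k lower) then
    ("benchmark", ["evaluation"], ["episodic", "working"], tags ++ ["benchmark", "agent-eval"])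
  else if PySem.Str.isIn "recursive" lower then
    ("mechanism", ["formation", "retrieval"], ["working"], tags ++ ["recursive", "long-context"])
  else if PySem.Str.isIn "sparse attention" lower || PySem.Str.isIn "msa" lower then
    ("mechanism", ["retrieval", "evolution"], ["working", "semantic"], tags ++ ["latent-memory", "attention"])
  else if PySem.Str.isIn "agentorchestra" lower || PySem.Str.isIn "tea" lower then
    ("framework", ["evolution", "retrieval"], ["procedural", "episodic"], tags ++ ["multi-agent", "protocol"])
  else if PySem.Str.isIn "memskill" lower then
    ("method", ["formation", "evolution"], ["episodic", "procedural"], tags ++ ["memory-policy", "skill"])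
  else if PySem.Str.isIn "memoria" lower then
    ("framework", ["formation", "evolution", "retrieval"], ["episodic", "semantic"], tags ++ ["personalization", "memory-service"])
  else if PySem.Str.isIn "bmam" lower then
    ("framework", ["evolution", "retrieval"], ["episodic", "semantic", "procedural"], tags ++ ["brain-inspired", "multi-agent"])
  else if PySem.Str.isIn "memagent" lower then
    ("system", ["formation", "evolution", "retrieval"], ["working", "episodic"], tags ++ ["rl", "long-context"])
  else
    (paper_type, lifecycle, functions, tags)

-- ===== PORT B =====
-- flat keyword → rule-index map (Python dict, iterated in insertion order)
def pvKeywordIndex : List (String × Nat) :=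
  [ ("memoryagentbench", 0), ("memoryarena", 0), ("ama-bench", 0), ("locomo", 0),
    ("longmemeval", 0), ("very long-term conversational", 0),
    ("long-term interactive memory", 0),
    ("recursive", 1),
    ("sparse attention", 2), ("msa", 2),
    ("agentorchestra", 3), ("tea", 3),
    ("memskill", 4),
    ("memoria", 5),
    ("bmam", 6),
    ("memagent", 7) ]

def pvMeta : List (String × List String × List String × List String) :=
  [ ("benchmark", ["evaluation"], ["episodic", "working"], ["benchmark", "agent-eval"]),
    ("mechanism", ["formation", "retrieval"], ["working"], ["recursive", "long-context"]),
    ("mechanism", ["retrieval", "evolution"], ["working", "semantic"], ["latent-memory", "attention"]),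
    ("framework", ["evolution", "retrieval"], ["procedural", "episodic"], ["multi-agent", "protocol"]),
    ("method", ["formation", "evolution"], ["episodic", "procedural"], ["memory-policy", "skill"]),
    ("framework", ["formation", "evolution", "retrieval"], ["episodic", "semantic"], ["personalization", "memory-service"]),
    ("framework", ["evolution", "retrieval"], ["episodic", "semantic", "procedural"], ["brain-inspired", "multi-agent"]),
    ("system", ["formation", "evolution", "retrieval"], ["working", "episodic"], ["rl", "long-context"]),
    ("system", ["retrieval"], ["semantic"], []) ]  -- default slot

def classify_paper_py_alt (title : String) : String × List String × List String × List String :=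
  let lower := PySem.Str.lower title
  let best := pvKeywordIndex.foldl
    (fun best kv => if decide (kv.2 < best) && PySem.Str.isIn kv.1 lower then kv.2 else best)
    (pvMeta.length - 1)
  let m := pvMeta.getD best ("system", ["retrieval"], ["semantic"], [])
  (m.1, m.2.1, m.2.2.1, ["agent-memory"] ++ m.2.2.2)

-- ===== PRECONDITION & SPEC =====
def Spec_classify_paper_py (title : String) (out : String × List String × List String × List String) : Prop := out = classify_paper_py_alt title
instance (title : String) (out : String × List String × List String × List String) : Decidable (Spec_classify_paper_py title out) := by unfold Spec_classify_paper_py; infer_instance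

-- ===== CLAIM =====
def Claim_equal_classify_paper_py : Prop := ∀ (title : String), Dom_classify_paper_py title → Spec_classify_paper_py title (classify_paper_py title)

-- ===== LEMMAS AND PROOFS =====

-- ===== VERDICT =====
set_option maxHeartbeats 1600000 in
theorem classify_paper_py_spec : Claim_equal_classify_paper_py := by
  intro title _
  unfold Spec_classify_paper_py classify_paper_py classify_paper_py_alt pvKeywordIndex pvMeta
  by_cases h0 : PySem.Chars.isIn ['m', 'e', 'm', 'o', 'r', 'y', 'a', 'g', 'e', 'n', 't', 'b', 'e', 'n', 'c', 'h'] (PySem.Chars.lower title.toList) = true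
  · simp [h0]
  ·
    by_cases h1 : PySem.Chars.isIn ['m', 'e', 'm', 'o', 'r', 'y', 'a', 'r', 'e', 'n', 'a'] (PySem.Chars.lower title.toList) = true
    · simp [h0, h1]
    ·
      by_cases h2 : PySem.Chars.isIn ['a', 'm', 'a', '-', 'b', 'e', 'n', 'c', 'h'] (PySem.Chars.lower title.toList) = true
      · simp [h0, h1, h2]
      ·
        by_cases h3 : PySem.Chars.isIn ['l', 'o', 'c', 'o', 'm', 'o'] (PySem.Chars.lower title.toList) = true
        · simp [h0, h1, h2, h3]
        ·
          by_cases h4 : PySem.Chars.isIn ['l', 'o', 'n', 'g', 'm', 'e', 'm', 'e', 'v', 'a', 'l'] (PySem.Chars.lower title.toList) = true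
          · simp [h0, h1, h2, h3, h4]
          ·
            by_cases h5 : PySem.Chars.isIn ['v', 'e', 'r', 'y', ' ', 'l', 'o', 'n', 'g', '-', 't', 'e', 'r', 'm', ' ', 'c', 'o', 'n', 'v', 'e', 'r', 's', 'a', 't', 'i', 'o', 'n', 'a', 'l'] (PySem.Chars.lower title.toList) = true
            · simp [h0, h1, h2, h3, h4, h5]
            ·
              by_cases h6 : PySem.Chars.isIn ['l', 'o', 'n', 'g', '-', 't', 'e', 'r', 'm', ' ', 'i', 'n', 't', 'e', 'r', 'a', 'c', 't', 'i', 'v', 'e', ' ', 'm', 'e', 'm', 'o', 'r', 'y'] (PySem.Chars.lower title.toList) = true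
              · simp [h0, h1, h2, h3, h4, h5, h6]
              ·
                by_cases h7 : PySem.Chars.isIn ['r', 'e', 'c', 'u', 'r', 's', 'i', 'v', 'e'] (PySem.Chars.lower title.toList) = true
                · simp [h0, h1, h2, h3, h4, h5, h6, h7]
                ·
                  by_cases h8 : PySem.Chars.isIn ['s', 'p', 'a', 'r', 's', 'e', ' ', 'a', 't', 't', 'e', 'n', 't', 'i', 'o', 'n'] (PySem.Chars.lower title.toList) = true
                  · simp [h0, h1, h2, h3, h4, h5, h6, h7, h8]
                  ·
                    by_cases h9 : PySem.Chars.isIn ['m', 's', 'a'] (PySem.Chars.lower title.toList) = true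
                    · simp [h0, h1, h2, h3, h4, h5, h6, h7, h8, h9]
                    ·
                      by_cases h10 : PySem.Chars.isIn ['a', 'g', 'e', 'n', 't', 'o', 'r', 'c', 'h', 'e', 's', 't', 'r', 'a'] (PySem.Chars.lower title.toList) = true
                      · simp [h0, h1, h2, h3, h4, h5, h6, h7, h8, h9, h10]
                      ·
                        by_cases h11 : PySem.Chars.isIn ['t', 'e', 'a'] (PySem.Chars.lower title.toList) = true
                        · simp [h0, h1, h2, h3, h4, h5, h6, h7, h8, h9, h10, h11]
                        ·
                          by_cases h12 : PySem.Chars.isIn ['m', 'e', 'm', 's', 'k', 'i', 'l', 'l'] (PySem.Chars.lower title.toList) = true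
                          · simp [h0, h1, h2, h3, h4, h5, h6, h7, h8, h9, h10, h11, h12]
                          ·
                            by_cases h13 : PySem.Chars.isIn ['m', 'e', 'm', 'o', 'r', 'i', 'a'] (PySem.Chars.lower title.toList) = true
                            · simp [h0, h1, h2, h3, h4, h5, h6, h7, h8, h9, h10, h11, h12, h13]
                            ·
                              by_cases h14 : PySem.Chars.isIn ['b', 'm', 'a', 'm'] (PySem.Chars.lower title.toList) = true
                              · simp [h0, h1, h2, h3, h4, h5, h6, h7, h8, h9, h10, h11, h12, h13, h14]
                              ·
                                by_cases h15 : PySem.Chars.isIn ['m', 'e', 'm', 'a', 'g', 'e', 'n', 't'] (PySem.Chars.lower title.toList) = true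
                                · simp [h0, h1, h2, h3, h4, h5, h6, h7, h8, h9, h10, h11, h12, h13, h14, h15]
                                · simp [h0, h1, h2, h3, h4, h5, h6, h7, h8, h9, h10, h11, h12, h13, h14, h15]
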